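-- pv_equiv track=rewrite | github.com/marcopolo866/Capstone | utilities/generate_graphs.py | sanitize_undirected_simple_adj
-- ===== SOURCE A (Python) =====
-- def sanitize_undirected_simple_adj(adj: list[list[int]]) -> list[list[int]]:
--     n = len(adj)
--     cleaned = [set() for _ in range(n)]
--     for u, neighbors in enumerate(adj):
--         for raw_v in neighbors:
--             try:
--                 v = int(raw_v)
--             except (TypeError, ValueError):
--                 continue
--             if v < 0 or v >= n or v == u:
--                 continue
--             cleaned[u].add(v)
--             cleaned[v].add(u)
--     return [sorted(list(s)) for s in cleaned]
-- ===== SOURCE B (Python) =====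
-- def sanitize_undirected_simple_adj(adj: list[list[int]]) -> list[list[int]]:
--     n = len(adj)
--     return [[v for v in range(n) if v != u and (v in adj[u] or u in adj[v])]
--             for u in range(n)]
-- ===== Notes on version B (the rewrite author's own statement) =====
-- stated objective: simpler
-- what changed: A builds a mutable array of per-vertex sets by double insertion over all edges and then sorts each set; B instead emits, for each vertex u, the already-sorted comprehension of all v in range(n) with v != u and v in adj[u] or u in adj[v], with no mutation, no sets and no sorting.
import Mathlib
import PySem

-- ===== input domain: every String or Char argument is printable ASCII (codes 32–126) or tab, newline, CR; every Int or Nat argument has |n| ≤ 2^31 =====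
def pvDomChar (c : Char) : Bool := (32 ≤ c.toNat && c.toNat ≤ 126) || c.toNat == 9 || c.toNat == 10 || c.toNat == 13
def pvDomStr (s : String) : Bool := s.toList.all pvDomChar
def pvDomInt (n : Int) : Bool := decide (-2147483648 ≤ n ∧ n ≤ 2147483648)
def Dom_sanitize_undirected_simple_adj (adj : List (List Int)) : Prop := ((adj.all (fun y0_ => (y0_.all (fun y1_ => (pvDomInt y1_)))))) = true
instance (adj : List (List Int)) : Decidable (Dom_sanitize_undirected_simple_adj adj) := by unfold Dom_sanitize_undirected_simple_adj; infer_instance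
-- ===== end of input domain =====

-- B replaces A's mutated array of per-vertex sets by a direct per-vertex comprehension
-- (v is a neighbour of u iff v is in range, v ≠ u, and v ∈ adj[u] or u ∈ adj[v]); objective: simpler.

-- ===== PORT A =====
-- one iteration of A's inner loop body: the guarded double insertion into cleaned
def pvStepA (n : Int) (cleaned : List (PySem.Set Int)) (p : Int × Int) : List (PySem.Set Int) :=
  if p.2 < 0 ∨ p.2 ≥ n ∨ p.2 = p.1 then cleaned
  else
    PySem.List.pySetD
      (PySem.List.pySetD cleaned p.1 (PySem.Set.add (PySem.List.pyGetD cleaned p.1 []) p.2))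
      p.2
      (PySem.Set.add
        (PySem.List.pyGetD (PySem.List.pySetD cleaned p.1 (PySem.Set.add (PySem.List.pyGetD cleaned p.1 []) p.2)) p.2 [])
        p.1)

def sanitize_undirected_simple_adj (adj : List (List Int)) : List (List Int) :=
  let n : Int := adj.length
  let cleaned : List (PySem.Set Int) := (List.range adj.length).map (fun _ => PySem.Set.empty)
  let final := (PySem.List.enumerate adj 0).foldl
    (fun cl p => p.2.foldl (fun cl rawv => pvStepA n cl (p.1, rawv)) cl) cleaned
  final.map (fun s => PySem.List.sorted s (fun x => x) false)

-- ===== PORT B =====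
def sanitize_undirected_simple_adj_alt (adj : List (List Int)) : List (List Int) :=
  let n : Int := adj.length
  (PySem.List.pyRange 0 n 1).map (fun u =>
    (PySem.List.pyRange 0 n 1).filter (fun v =>
      v != u && ((PySem.List.pyGetD adj u []).contains v || (PySem.List.pyGetD adj v []).contains u)))

-- ===== PRECONDITION & SPEC =====
def Spec_sanitize_undirected_simple_adj (adj : List (List Int)) (out : List (List Int)) : Prop := out = sanitize_undirected_simple_adj_alt adj
instance (adj : List (List Int)) (out : List (List Int)) : Decidable (Spec_sanitize_undirected_simple_adj adj out) := by unfold Spec_sanitize_undirected_simple_adj; infer_instance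

-- ===== CLAIM (what is proved, stated in full; the proofs are below) =====
def Claim_equal_sanitize_undirected_simple_adj : Prop := ∀ (adj : List (List Int)), Dom_sanitize_undirected_simple_adj adj → Spec_sanitize_undirected_simple_adj adj (sanitize_undirected_simple_adj adj)

-- ===== LEMMAS AND PROOFS =====

-- A's nested loop over enumerate = a foldl of pvStepA over the flattened (u, raw_v) pairs
theorem pvFlatten (n : Int) (E : List (Int × List Int)) (s : List (PySem.Set Int)) :
    E.foldl (fun cl p => p.2.foldl (fun cl rawv => pvStepA n cl (p.1, rawv)) cl) s
      = (E.flatMap (fun p => p.2.map (fun v => (p.1, v)))).foldl (pvStepA n) s := by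
  induction E generalizing s with
  | nil => rfl
  | cons p E ih =>
      simp only [List.foldl_cons, List.flatMap_cons, List.foldl_append, List.foldl_map]
      exact ih _

theorem pvStepA_length (n : Int) (s : List (PySem.Set Int)) (p : Int × Int) :
    (pvStepA n s p).length = s.length := by
  unfold pvStepA
  split
  · rfl
  · simp [PySem.List.length_pySetD]


theorem pvFoldl_length (n : Int) (L : List (Int × Int)) (s : List (PySem.Set Int)) :
    (L.foldl (pvStepA n) s).length = s.length := by
  induction L generalizing s with
  | nil => rfl
  | cons p L ih => simp [List.foldl_cons, ih, pvStepA_length]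

-- membership in one cell after one step
theorem pvStepA_cell (n : Int) (s : List (PySem.Set Int)) (p : Int × Int)
    (hn : (s.length : Int) = n) (hu0 : 0 ≤ p.1) (hu1 : p.1 < n) (w : Nat) (x : Int) :
    x ∈ (pvStepA n s p).getD w [] ↔
      x ∈ s.getD w [] ∨ (¬ (p.2 < 0 ∨ p.2 ≥ n ∨ p.2 = p.1) ∧
        ((p.1 = (w : Int) ∧ p.2 = x) ∨ (p.2 = (w : Int) ∧ p.1 = x))) := by
  unfold pvStepA
  split_ifs with hg
  · simp [hg]
  · push_neg at hg
    obtain ⟨hv0, hvn, hvu⟩ := hg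
    have hsu : p.1.toNat < s.length := by omega
    have hsv : p.2.toNat < s.length := by omega
    have hne : p.1.toNat ≠ p.2.toNat := by omega
    rw [PySem.List.pySetD_of_nonneg _ _ hu0,
        PySem.List.pyGetD_eq_getElem _ _ hu0 (by omega),
        PySem.List.pySetD_of_nonneg _ _ hv0,
        PySem.List.pyGetD_eq_getElem _ _ hv0 (by simp; omega),
        List.getElem_set_ne (by omega) (by simpa using hsv)]
    by_cases hwv : w = p.2.toNat
    · subst hwv
      rw [List.getD_eq_getElem _ _ (show p.2.toNat < ((s.set p.1.toNat (s[p.1.toNat].add p.2)).set p.2.toNat (s[p.2.toNat].add p.1)).length by simpa using hsv),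
          List.getElem_set_self _, List.getD_eq_getElem _ _ hsv]
      simp only [PySem.Set.mem_add]
      constructor
      · rintro (h | rfl)
        · exact Or.inl h
        · exact Or.inr ⟨by omega, Or.inr ⟨by omega, rfl⟩⟩
      · rintro (h | ⟨-, (⟨h1, rfl⟩ | ⟨h1, rfl⟩)⟩)
        · exact Or.inl h
        · omega
        · exact Or.inr rfl
    · by_cases hwu : w = p.1.toNat
      · subst hwu
        rw [List.getD_eq_getElem _ _ (show p.1.toNat < ((s.set p.1.toNat (s[p.1.toNat].add p.2)).set p.2.toNat (s[p.2.toNat].add p.1)).length by simpa using hsu),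
            List.getElem_set_ne (by omega) (by simpa using hsu),
            List.getElem_set_self _, List.getD_eq_getElem _ _ hsu]
        simp only [PySem.Set.mem_add]
        constructor
        · rintro (h | rfl)
          · exact Or.inl h
          · exact Or.inr ⟨by omega, Or.inl ⟨by omega, rfl⟩⟩
        · rintro (h | ⟨-, (⟨h1, rfl⟩ | ⟨h1, rfl⟩)⟩)
          · exact Or.inl h
          · exact Or.inr rfl
          · omega
      · have h1 : ((s.set p.1.toNat (s[p.1.toNat].add p.2)).set p.2.toNat (s[p.2.toNat].add p.1)).getD w []
            = s.getD w [] := by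
          by_cases hw : w < s.length
          · rw [List.getD_eq_getElem _ _ (show w < ((s.set p.1.toNat (s[p.1.toNat].add p.2)).set p.2.toNat (s[p.2.toNat].add p.1)).length by simpa using hw),
                List.getElem_set_ne (by omega) (by simpa using hw),
                List.getElem_set_ne (by omega) (by simpa using hw), List.getD_eq_getElem _ _ hw]
          · rw [List.getD_eq_default _ _ (by simpa using (by omega : s.length ≤ w)),
                List.getD_eq_default _ _ (by omega)]
        rw [h1]
        constructor
        · exact Or.inl
        · rintro (h | ⟨-, (⟨h2, rfl⟩ | ⟨h2, rfl⟩)⟩)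
          · exact h
          · omega
          · omega

-- the main invariant: membership in cell w of the folded state
theorem pvFoldl_cell (n : Int) (L : List (Int × Int)) (s : List (PySem.Set Int))
    (hn : (s.length : Int) = n) (hL : ∀ p ∈ L, 0 ≤ p.1 ∧ p.1 < n) (w : Nat) (x : Int) :
    x ∈ (L.foldl (pvStepA n) s).getD w [] ↔
      x ∈ s.getD w [] ∨ ∃ p ∈ L, (¬ (p.2 < 0 ∨ p.2 ≥ n ∨ p.2 = p.1) ∧
        ((p.1 = (w : Int) ∧ p.2 = x) ∨ (p.2 = (w : Int) ∧ p.1 = x))) := by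
  induction L generalizing s with
  | nil => simp
  | cons p L ih =>
      simp only [List.foldl_cons, List.mem_cons]
      have hp := hL p (List.mem_cons_self ..)
      rw [ih (pvStepA n s p) (by rw [pvStepA_length]; exact hn) (fun q hq => hL q (List.mem_cons_of_mem _ hq)),
          pvStepA_cell n s p hn hp.1 hp.2]
      constructor
      · rintro ((h | h) | ⟨q, hq, h⟩)
        · exact Or.inl h
        · exact Or.inr ⟨p, Or.inl rfl, h⟩
        · exact Or.inr ⟨q, Or.inr hq, h⟩
      · rintro (h | ⟨q, (rfl | hq), h⟩)
        · exact Or.inl (Or.inl h)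
        · exact Or.inl (Or.inr h)
        · exact Or.inr ⟨q, hq, h⟩

theorem pvStepA_nodup (n : Int) (s : List (PySem.Set Int)) (p : Int × Int)
    (hn : (s.length : Int) = n) (hu0 : 0 ≤ p.1) (hu1 : p.1 < n)
    (h : ∀ w : Nat, (s.getD w []).Nodup) : ∀ w : Nat, ((pvStepA n s p).getD w []).Nodup := by
  intro w
  unfold pvStepA
  split_ifs with hg
  · exact h w
  · push_neg at hg
    obtain ⟨hv0, hvn, hvu⟩ := hg
    have hsu : p.1.toNat < s.length := by omega
    have hsv : p.2.toNat < s.length := by omega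
    rw [PySem.List.pySetD_of_nonneg _ _ hu0,
        PySem.List.pyGetD_eq_getElem _ _ hu0 (by omega),
        PySem.List.pySetD_of_nonneg _ _ hv0,
        PySem.List.pyGetD_eq_getElem _ _ hv0 (by simp; omega),
        List.getElem_set_ne (by omega) (by simpa using hsv)]
    by_cases hwv : w = p.2.toNat
    · subst hwv
      rw [List.getD_eq_getElem _ _ (show p.2.toNat < ((s.set p.1.toNat (s[p.1.toNat].add p.2)).set p.2.toNat (s[p.2.toNat].add p.1)).length by simpa using hsv),
          List.getElem_set_self _]
      refine PySem.Set.nodup_add _ _ ?_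
      have := h p.2.toNat
      rwa [List.getD_eq_getElem _ _ hsv] at this
    · by_cases hwu : w = p.1.toNat
      · subst hwu
        rw [List.getD_eq_getElem _ _ (show p.1.toNat < ((s.set p.1.toNat (s[p.1.toNat].add p.2)).set p.2.toNat (s[p.2.toNat].add p.1)).length by simpa using hsu),
            List.getElem_set_ne (by omega) (by simpa using hsu),
            List.getElem_set_self _]
        refine PySem.Set.nodup_add _ _ ?_
        have := h p.1.toNat
        rwa [List.getD_eq_getElem _ _ hsu] at this
      · have h1 : ((s.set p.1.toNat (s[p.1.toNat].add p.2)).set p.2.toNat (s[p.2.toNat].add p.1)).getD w []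
            = s.getD w [] := by
          by_cases hw : w < s.length
          · rw [List.getD_eq_getElem _ _ (show w < ((s.set p.1.toNat (s[p.1.toNat].add p.2)).set p.2.toNat (s[p.2.toNat].add p.1)).length by simpa using hw),
                List.getElem_set_ne (by omega) (by simpa using hw),
                List.getElem_set_ne (by omega) (by simpa using hw), List.getD_eq_getElem _ _ hw]
          · rw [List.getD_eq_default _ _ (by simpa using (by omega : s.length ≤ w)),
                List.getD_eq_default _ _ (by omega)]
        rw [h1]
        exact h w

theorem pvFoldl_nodup (n : Int) (L : List (Int × Int)) (s : List (PySem.Set Int))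
    (hn : (s.length : Int) = n) (hL : ∀ p ∈ L, 0 ≤ p.1 ∧ p.1 < n)
    (h : ∀ w : Nat, (s.getD w []).Nodup) : ∀ w : Nat, ((L.foldl (pvStepA n) s).getD w []).Nodup := by
  induction L generalizing s with
  | nil => exact h
  | cons p L ih =>
      have hp := hL p (List.mem_cons_self ..)
      exact ih (pvStepA n s p) (by rw [pvStepA_length]; exact hn)
        (fun q hq => hL q (List.mem_cons_of_mem _ hq))
        (pvStepA_nodup n s p hn hp.1 hp.2 h)

-- the flattened pair list of A's two nested loops
def pvPairs (adj : List (List Int)) : List (Int × Int) :=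
  (PySem.List.enumerate adj 0).flatMap (fun p => p.2.map (fun v => (p.1, v)))

theorem pvMem_pairs (adj : List (List Int)) (q : Int × Int) :
    q ∈ pvPairs adj ↔ ∃ (k : Nat) (hk : k < adj.length), q.1 = (k : Int) ∧ q.2 ∈ adj[k] := by
  unfold pvPairs
  simp only [List.mem_flatMap, PySem.List.mem_enumerate_iff, List.mem_map]
  constructor
  · rintro ⟨p, ⟨k, hk, rfl⟩, v, hv, rfl⟩
    exact ⟨k, hk, by simpa using rfl, by simpa using hv⟩
  · rintro ⟨k, hk, h1, h2⟩
    exact ⟨((k : Int), adj[k]), ⟨k, hk, by simp⟩, q.2, h2, by simp [← h1]⟩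

theorem pvInit_cell (m : Nat) (w : Nat) :
    (((List.range m).map (fun _ => PySem.Set.empty)).getD w [] : PySem.Set Int) = [] := by
  by_cases hw : w < m
  · rw [List.getD_eq_getElem _ _ (by simpa using hw)]
    simp [PySem.Set.empty]
  · rw [List.getD_eq_default _ _ (by simpa using (by omega : m ≤ w))]

-- membership in the w-th cell of A's finished state
theorem pvMemFinal (adj : List (List Int)) (w : Nat) (hw : w < adj.length) (x : Int) :
    x ∈ ((pvPairs adj).foldl (pvStepA (adj.length : Int)) ((List.range adj.length).map (fun _ => PySem.Set.empty))).getD w [] ↔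
      0 ≤ x ∧ x < (adj.length : Int) ∧ x ≠ (w : Int) ∧
        (x ∈ PySem.List.pyGetD adj (w : Int) [] ∨ (w : Int) ∈ PySem.List.pyGetD adj x []) := by
  rw [pvFoldl_cell (adj.length : Int) (pvPairs adj) _ (by simp)
      (fun p hp => by
        obtain ⟨k, hk, h1, -⟩ := (pvMem_pairs adj p).mp hp
        constructor <;> omega),
      pvInit_cell]
  simp only [List.not_mem_nil, false_or]
  constructor
  · rintro ⟨p, hp, hg, hcase⟩
    obtain ⟨k, hk, h1, h2⟩ := (pvMem_pairs adj p).mp hp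
    push_neg at hg
    obtain ⟨hg0, hg1, hg2⟩ := hg
    rcases hcase with ⟨hk2, rfl⟩ | ⟨hvw, hk2⟩
    · refine ⟨by omega, by omega, by omega, Or.inl ?_⟩
      rw [PySem.List.pyGetD_natCast, List.getD_eq_getElem _ _ hw]
      have : k = w := by omega
      subst this; exact h2
    · refine ⟨by omega, by omega, by omega, Or.inr ?_⟩
      rw [PySem.List.pyGetD_eq_getElem _ _ (by omega) (by omega)]
      have hx : x.toNat = k := by omega
      have h3 : ((w : Int)) ∈ adj[k] := hvw ▸ h2
      simpa [hx] using h3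
  · rintro ⟨hx0, hxn, hxw, hmem | hmem⟩
    · rw [PySem.List.pyGetD_natCast, List.getD_eq_getElem _ _ hw] at hmem
      refine ⟨((w : Int), x), (pvMem_pairs adj _).mpr ⟨w, hw, rfl, hmem⟩, by simp; omega,
        Or.inl ⟨rfl, rfl⟩⟩
    · rw [PySem.List.pyGetD_eq_getElem _ _ hx0 (by omega)] at hmem
      refine ⟨(x, (w : Int)), (pvMem_pairs adj _).mpr ⟨x.toNat, by omega, by omega, hmem⟩,
        by simp; omega, Or.inr ⟨rfl, rfl⟩⟩

-- ===== VERDICT (by name: the statement is the Claim_ definition above) =====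
theorem sanitize_undirected_simple_adj_spec : Claim_equal_sanitize_undirected_simple_adj := by
  intro adj _
  unfold Spec_sanitize_undirected_simple_adj
  unfold sanitize_undirected_simple_adj sanitize_undirected_simple_adj_alt
  dsimp only
  rw [pvFlatten]
  rw [show (PySem.List.enumerate adj 0).flatMap (fun p => p.2.map (fun v => (p.1, v))) = pvPairs adj from rfl]
  set F := (pvPairs adj).foldl (pvStepA (adj.length : Int))
    ((List.range adj.length).map (fun _ => PySem.Set.empty)) with hF
  have hlenF : F.length = adj.length := by
    rw [hF, pvFoldl_length]; simp
  apply List.ext_getElem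
  · simp only [List.length_map, hlenF, PySem.List.length_pyRange_one]
    omega
  · intro w hw1 hw2
    have hw : w < adj.length := by simpa [hlenF] using hw1
    rw [List.getElem_map, List.getElem_map, PySem.List.getElem_pyRange_one]
    have hcell : F[w] = F.getD w [] := by
      rw [List.getD_eq_getElem _ _ (by omega)]
    rw [hcell]
    refine PySem.List.sorted_eq_of_perm_of_pairwise_lt _ _ _ ?_ ?_
    · rw [List.perm_ext_iff_of_nodup ((PySem.List.nodup_pyRange_one 0 (adj.length : Int)).filter _)
        (pvFoldl_nodup (adj.length : Int) (pvPairs adj) _ (by simp)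
          (fun p hp => by
            obtain ⟨k, hk, h1, -⟩ := (pvMem_pairs adj p).mp hp
            constructor <;> omega)
          (fun w' => by rw [pvInit_cell]; exact List.nodup_nil) w)]
      intro x
      rw [List.mem_filter, pvMemFinal adj w hw x, PySem.List.mem_pyRange_one]
      simp only [zero_add, Bool.and_eq_true, bne_iff_ne, ne_eq, Bool.or_eq_true,
        List.contains_eq_mem, decide_eq_true_eq]
      constructor
      · rintro ⟨⟨h1, h2⟩, h3, h4⟩
        exact ⟨h1, h2, h3, h4⟩
      · rintro ⟨h1, h2, h3, h4⟩
        exact ⟨⟨h1, h2⟩, h3, h4⟩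
    · exact ((PySem.List.pairwise_lt_pyRange_one 0 (adj.length : Int)).filter _)
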